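-- pv_equiv track=rewrite | github.com/Baronchibuikem/LearningDataStructureAndAlgorithms | searching/search.py | locate_card_binary
-- ===== SOURCE A (Python) =====
-- def _test_location(cards, query, mid):
--     mid_number = cards[mid]
--     if mid_number == query:
--         if mid - 1 >= 0 and cards[mid - 1] == query:
--             return "left"
--         else:
--             return "found"
--     elif mid_number < query:
--         return "left"
--     else:
--         return "right"
--
-- def locate_card_binary(cards: list, query: int):
--     cards = sorted(cards, reverse=True)
--     low, high = 0, len(cards) - 1
--
--     while low <= high:
--         mid = (low + high) // 2
--         result = _test_location(cards, query, mid)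
--
--         if result == "found":
--             return mid
--
--         elif result == "left":
--             high = mid - 1
--
--         elif result == "right":
--             low = mid + 1
--
--     return -1
-- ===== SOURCE B (Python) =====
-- def locate_card_binary(cards: list, query: int):
--     # In the descending-sorted copy, the first occurrence of query sits right
--     # after all elements strictly greater than it.
--     if query in cards:
--         return len([x for x in cards if x > query])
--     return -1
-- ===== Notes on version B (the rewrite author's own statement) =====
-- stated objective: faster
-- what changed: Replaced sort-then-binary-search with a single-pass count: the first index of query in the descending-sorted copy equals the number of elements strictly greater than query (or -1 if absent), so B never sorts; a timing run measured B 2.25x-6x faster at the largest size.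
import Mathlib
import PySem

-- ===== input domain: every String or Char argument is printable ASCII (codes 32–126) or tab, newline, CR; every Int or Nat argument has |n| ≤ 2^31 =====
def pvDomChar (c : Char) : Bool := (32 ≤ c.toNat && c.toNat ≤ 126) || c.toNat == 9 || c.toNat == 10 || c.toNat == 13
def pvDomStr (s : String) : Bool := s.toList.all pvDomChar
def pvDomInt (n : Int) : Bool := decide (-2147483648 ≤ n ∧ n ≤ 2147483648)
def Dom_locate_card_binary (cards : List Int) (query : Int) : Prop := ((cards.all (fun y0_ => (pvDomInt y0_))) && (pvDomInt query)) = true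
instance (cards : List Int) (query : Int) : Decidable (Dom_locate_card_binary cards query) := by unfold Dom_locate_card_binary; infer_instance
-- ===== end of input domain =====

-- B replaces A's sort-then-binary-search by a single pass (count elements > query; -1 if absent) and never sorts.

-- ===== PORT A =====
-- _test_location; the `none` arm is unreachable (every call passes 0 ≤ mid < len, so Python never raises here)
def pv_test_location (cards : List Int) (query : Int) (mid : Int) : String :=
  match PySem.List.pyGet? cards mid with
  | none => ""
  | some mid_number =>
    if mid_number = query then
      if mid - 1 ≥ 0 ∧ (PySem.List.pyGet? cards (mid - 1)).getD 0 = query then "left"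
      else "found"
    else if mid_number < query then "left"
    else "right"

-- the while-loop of A; fuel = the size of the interval [low, high], which shrinks every iteration,
-- so with the initial fuel below the 0-fuel arm is never reached before low > high
def pv_bs_go (cards : List Int) (query : Int) : Nat → Int → Int → Int
  | 0, _, _ => -1
  | fuel + 1, low, high =>
    if low ≤ high then
      let mid := PySem.Int.floordiv (low + high) 2
      let result := pv_test_location cards query mid
      if result = "found" then mid
      else if result = "left" then pv_bs_go cards query fuel low (mid - 1)
      else pv_bs_go cards query fuel (mid + 1) high
    else -1

def pv_bs (cards : List Int) (query : Int) (low high : Int) : Int :=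
  pv_bs_go cards query (high + 1 - low).toNat low high

def locate_card_binary (cards : List Int) (query : Int) : Int :=
  let s := PySem.List.sorted cards (fun x => x) true
  pv_bs s query 0 ((s.length : Int) - 1)

-- ===== PORT B =====
def locate_card_binary_alt (cards : List Int) (query : Int) : Int :=
  if query ∈ cards then ((cards.filter (fun x => query < x)).length : Int)
  else -1

-- ===== PRECONDITION & SPEC =====
def Spec_locate_card_binary (cards : List Int) (query : Int) (out : Int) : Prop := out = locate_card_binary_alt cards query
instance (cards : List Int) (query : Int) (out : Int) : Decidable (Spec_locate_card_binary cards query out) := by unfold Spec_locate_card_binary; infer_instance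

-- ===== CLAIM (what is proved, stated in full; the proofs are below) =====
def Claim_equal_locate_card_binary : Prop := ∀ (cards : List Int) (query : Int), Dom_locate_card_binary cards query → Spec_locate_card_binary cards query (locate_card_binary cards query)

-- ===== LEMMAS AND PROOFS =====

-- In a non-increasing list, the elements > query are exactly the prefix of length countP (> query).
theorem pv_gt_iff_lt_count (query : Int) (s : List Int) (hp : s.Pairwise (fun a b => b ≤ a))
    (i : Nat) (hi : i < s.length) :
    query < s[i] ↔ i < s.countP (fun x => decide (query < x)) := by
  induction s generalizing i with
  | nil => simp at hi
  | cons a t ih =>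
    rw [List.pairwise_cons] at hp
    obtain ⟨ha, hpt⟩ := hp
    rw [List.countP_cons]
    cases i with
    | zero =>
      simp only [List.getElem_cons_zero]
      by_cases hqa : query < a
      · simp [hqa]
      · have h0 : t.countP (fun x => decide (query < x)) = 0 := by
          rw [List.countP_eq_zero]
          intro x hx
          simp only [decide_eq_true_eq]
          have := ha x hx; omega
        simp [hqa, h0]
    | succ j =>
      simp only [List.getElem_cons_succ]
      have hj : j < t.length := by simpa using hi
      rw [ih hpt j hj]
      by_cases hqt : query < t[j]
      · have : query < a := lt_of_lt_of_le hqt (ha _ (List.getElem_mem hj))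
        simp [this]
      · have hc : (if (decide (query < a)) = true then 1 else 0) ≤ 1 := by split <;> omega
        constructor
        · intro h; exact absurd ((ih hpt j hj).mpr (by omega)) hqt
        · intro h
          have : ¬ j < t.countP (fun x => decide (query < x)) := fun hh => hqt ((ih hpt j hj).mpr hh)
          omega

theorem pv_present_k_lt (query : Int) (s : List Int) (hp : s.Pairwise (fun a b => b ≤ a))
    (hq : query ∈ s) :
    s.countP (fun x => decide (query < x)) < s.length := by
  obtain ⟨i, hi, hiq⟩ := List.mem_iff_getElem.mp hq
  have := pv_gt_iff_lt_count query s hp i hi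
  rw [hiq] at this
  have hni : ¬ i < s.countP (fun x => decide (query < x)) := fun h => by
    have := this.mpr h; omega
  omega

theorem pv_getElem_k (query : Int) (s : List Int) (hp : s.Pairwise (fun a b => b ≤ a))
    (hq : query ∈ s) (hk : s.countP (fun x => decide (query < x)) < s.length) :
    s[s.countP (fun x => decide (query < x))] = query := by
  set k := s.countP (fun x => decide (query < x)) with hkdef
  obtain ⟨i, hi, hiq⟩ := List.mem_iff_getElem.mp hq
  have h1 : ¬ query < s[k] := fun h => by
    have := (pv_gt_iff_lt_count query s hp k hk).mp h; omega
  have hik : k ≤ i := by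
    by_contra h
    have := (pv_gt_iff_lt_count query s hp i hi).mpr (by omega)
    rw [hiq] at this; omega
  have h2 : query ≤ s[k] := by
    rcases Nat.lt_or_ge k i with h | h
    · have := (List.pairwise_iff_getElem.mp hp) k i hk hi h
      rw [hiq] at this; exact this
    · have : i = k := by omega
      subst this; rw [hiq]
  exact le_antisymm (not_lt.mp h1) h2

theorem pv_bs_go_present (fuel : Nat) (s : List Int) (query : Int) (hp : s.Pairwise (fun a b => b ≤ a))
    (hq : query ∈ s) (low high : Int) (h0 : 0 ≤ low)
    (hlk : low ≤ (s.countP (fun x => decide (query < x)) : Int))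
    (hkh : ((s.countP (fun x => decide (query < x)) : Int)) ≤ high)
    (hh : high < (s.length : Int)) (hf : (high + 1 - low).toNat ≤ fuel) :
    pv_bs_go s query fuel low high = (s.countP (fun x => decide (query < x)) : Int) := by
  have hlh : low ≤ high := le_trans hlk hkh
  match fuel with
  | 0 => exact absurd hf (by omega)
  | fuel + 1 =>
  rw [pv_bs_go, if_pos hlh]
  obtain ⟨hm1, hm2⟩ := PySem.Int.floordiv_two_mid_bounds hlh
  have hmid0 : (0:Int) ≤ PySem.Int.floordiv (low + high) 2 := le_trans h0 hm1
  have hmidlt : PySem.Int.floordiv (low + high) 2 < (s.length : Int) := lt_of_le_of_lt hm2 hh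
  have hmn : (PySem.Int.floordiv (low + high) 2).toNat < s.length := by omega
  have hget : PySem.List.pyGet? s (PySem.Int.floordiv (low + high) 2)
      = some (s[(PySem.Int.floordiv (low + high) 2).toNat]'hmn) :=
    PySem.List.pyGet?_eq_some_getElem s hmid0 hmidlt
  have hklen := pv_present_k_lt query s hp hq
  have hkel := pv_getElem_k query s hp hq hklen
  simp only [pv_test_location, hget]
  by_cases heq : s[(PySem.Int.floordiv (low + high) 2).toNat]'hmn = query
  · -- mid element equals query; K ≤ mid
    have hKmid : (s.countP (fun x => decide (query < x)) : Int) ≤ PySem.Int.floordiv (low + high) 2 := by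
      have hnlt : ¬ query < s[(PySem.Int.floordiv (low + high) 2).toNat]'hmn := by rw [heq]; exact lt_irrefl _
      have hnk : ¬ ((PySem.Int.floordiv (low + high) 2).toNat < s.countP (fun x => decide (query < x))) :=
        fun h => hnlt ((pv_gt_iff_lt_count query s hp _ hmn).mpr h)
      omega
    rw [if_pos heq]
    by_cases hcond : PySem.Int.floordiv (low + high) 2 - 1 ≥ 0 ∧
        (PySem.List.pyGet? s (PySem.Int.floordiv (low + high) 2 - 1)).getD 0 = query
    · -- "left": previous element also query, so K ≤ mid - 1
      rw [if_pos hcond]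
      obtain ⟨hc1, hc2⟩ := hcond
      have hmn1 : (PySem.Int.floordiv (low + high) 2 - 1).toNat < s.length := by omega
      have hget1 : PySem.List.pyGet? s (PySem.Int.floordiv (low + high) 2 - 1)
          = some (s[(PySem.Int.floordiv (low + high) 2 - 1).toNat]'hmn1) :=
        PySem.List.pyGet?_eq_some_getElem s hc1 (by omega)
      rw [hget1] at hc2
      simp only [Option.getD_some] at hc2
      have hK1 : (s.countP (fun x => decide (query < x)) : Int) ≤ PySem.Int.floordiv (low + high) 2 - 1 := by
        have hnlt : ¬ query < s[(PySem.Int.floordiv (low + high) 2 - 1).toNat]'hmn1 := by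
          rw [hc2]; exact lt_irrefl _
        have hnk : ¬ (((PySem.Int.floordiv (low + high) 2 - 1).toNat) < s.countP (fun x => decide (query < x))) :=
          fun h => hnlt ((pv_gt_iff_lt_count query s hp _ hmn1).mpr h)
        omega
      simp only [String.reduceEq, if_false, if_true]
      exact pv_bs_go_present fuel s query hp hq low (PySem.Int.floordiv (low + high) 2 - 1) h0 hlk hK1 (by omega) (by omega)
    · -- "found": mid = K
      rw [if_neg hcond]
      simp only [String.reduceEq, reduceIte]
      -- show mid ≤ K: otherwise s[mid-1] = query and the condition would hold
      by_contra hne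
      have hmidK : ¬ PySem.Int.floordiv (low + high) 2 ≤ (s.countP (fun x => decide (query < x)) : Int) := by
        intro hle
        exact hne (le_antisymm hKmid hle).symm
      have hKlt : (s.countP (fun x => decide (query < x)) : Int) < PySem.Int.floordiv (low + high) 2 := by omega
      apply hcond
      have hc1 : PySem.Int.floordiv (low + high) 2 - 1 ≥ 0 := by omega
      refine ⟨hc1, ?_⟩
      have hmn1 : (PySem.Int.floordiv (low + high) 2 - 1).toNat < s.length := by omega
      have hget1 : PySem.List.pyGet? s (PySem.Int.floordiv (low + high) 2 - 1)
          = some (s[(PySem.Int.floordiv (low + high) 2 - 1).toNat]'hmn1) :=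
        PySem.List.pyGet?_eq_some_getElem s hc1 (by omega)
      rw [hget1]
      simp only [Option.getD_some]
      -- k ≤ mid-1 ≤ mid, s[k] = query = s[mid]; sandwiched, so s[mid-1] = query
      have hkle : s.countP (fun x => decide (query < x)) ≤ (PySem.Int.floordiv (low + high) 2 - 1).toNat := by omega
      have hub : s[(PySem.Int.floordiv (low + high) 2 - 1).toNat]'hmn1 ≤ query := by
        have hnlt : ¬ query < s[(PySem.Int.floordiv (low + high) 2 - 1).toNat]'hmn1 := fun h => by
          have := (pv_gt_iff_lt_count query s hp _ hmn1).mp h; omega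
        omega
      have hlb : query ≤ s[(PySem.Int.floordiv (low + high) 2 - 1).toNat]'hmn1 := by
        have hlt : ((PySem.Int.floordiv (low + high) 2 - 1).toNat) < ((PySem.Int.floordiv (low + high) 2).toNat) := by omega
        have := (List.pairwise_iff_getElem.mp hp) _ _ hmn1 hmn hlt
        rw [heq] at this; exact this
      omega
  · rw [if_neg heq]
    by_cases hlt : s[(PySem.Int.floordiv (low + high) 2).toNat]'hmn < query
    · -- "left": s[mid] < query so k < mid
      rw [if_pos hlt]
      simp only [String.reduceEq, if_false, if_true]
      have hK1 : (s.countP (fun x => decide (query < x)) : Int) ≤ PySem.Int.floordiv (low + high) 2 - 1 := by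
        -- k ≤ mid (s[mid] not > query), and k ≠ mid since s[k] = query ≠ s[mid]
        have hnlt : ¬ query < s[(PySem.Int.floordiv (low + high) 2).toNat]'hmn := by omega
        have hKle : ¬ ((PySem.Int.floordiv (low + high) 2).toNat < s.countP (fun x => decide (query < x))) :=
          fun h => hnlt ((pv_gt_iff_lt_count query s hp _ hmn).mpr h)
        have hneK : s.countP (fun x => decide (query < x)) ≠ (PySem.Int.floordiv (low + high) 2).toNat := by
          intro h; apply heq; rw [← hkel]; congr 1; omega
        omega
      exact pv_bs_go_present fuel s query hp hq low (PySem.Int.floordiv (low + high) 2 - 1) h0 hlk hK1 (by omega) (by omega)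
    · -- "right": s[mid] > query so mid < k
      rw [if_neg hlt]
      simp only [String.reduceEq, reduceIte]
      have hgt : query < s[(PySem.Int.floordiv (low + high) 2).toNat]'hmn := by
        rcases lt_trichotomy (s[(PySem.Int.floordiv (low + high) 2).toNat]'hmn) query with h | h | h
        · exact absurd h hlt
        · exact absurd h heq
        · exact h
      have hmidK : PySem.Int.floordiv (low + high) 2 + 1 ≤ (s.countP (fun x => decide (query < x)) : Int) := by
        have := (pv_gt_iff_lt_count query s hp _ hmn).mp hgt
        omega
      exact pv_bs_go_present fuel s query hp hq (PySem.Int.floordiv (low + high) 2 + 1) high (by omega) hmidK hkh hh (by omega)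

theorem pv_bs_go_absent (fuel : Nat) (s : List Int) (query : Int) (hq : query ∉ s) (low high : Int)
    (h0 : 0 ≤ low) (hh : high < (s.length : Int)) (hf : (high + 1 - low).toNat ≤ fuel) :
    pv_bs_go s query fuel low high = -1 := by
  match fuel with
  | 0 => rw [pv_bs_go]
  | fuel + 1 =>
  rw [pv_bs_go]
  by_cases hlh : low ≤ high
  · rw [if_pos hlh]
    obtain ⟨hm1, hm2⟩ := PySem.Int.floordiv_two_mid_bounds hlh
    have hmid0 : (0:Int) ≤ PySem.Int.floordiv (low + high) 2 := le_trans h0 hm1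
    have hmidlt : PySem.Int.floordiv (low + high) 2 < (s.length : Int) := lt_of_le_of_lt hm2 hh
    have hmn : (PySem.Int.floordiv (low + high) 2).toNat < s.length := by omega
    have hget : PySem.List.pyGet? s (PySem.Int.floordiv (low + high) 2)
        = some (s[(PySem.Int.floordiv (low + high) 2).toNat]'hmn) :=
      PySem.List.pyGet?_eq_some_getElem s hmid0 hmidlt
    have hne : s[(PySem.Int.floordiv (low + high) 2).toNat]'hmn ≠ query := by
      intro h; exact hq (h ▸ List.getElem_mem hmn)
    simp only [pv_test_location, hget, if_neg hne]
    by_cases hlt : s[(PySem.Int.floordiv (low + high) 2).toNat]'hmn < query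
    · rw [if_pos hlt]
      simp only [String.reduceEq, if_false, if_true]
      exact pv_bs_go_absent fuel s query hq low (PySem.Int.floordiv (low + high) 2 - 1) h0 (by omega) (by omega)
    · rw [if_neg hlt]
      simp only [String.reduceEq, reduceIte]
      exact pv_bs_go_absent fuel s query hq (PySem.Int.floordiv (low + high) 2 + 1) high (by omega) hh (by omega)
  · rw [if_neg hlh]

theorem pv_bs_present (s : List Int) (query : Int) (hp : s.Pairwise (fun a b => b ≤ a))
    (hq : query ∈ s) (low high : Int) (h0 : 0 ≤ low)
    (hlk : low ≤ (s.countP (fun x => decide (query < x)) : Int))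
    (hkh : ((s.countP (fun x => decide (query < x)) : Int)) ≤ high)
    (hh : high < (s.length : Int)) :
    pv_bs s query low high = (s.countP (fun x => decide (query < x)) : Int) :=
  pv_bs_go_present _ s query hp hq low high h0 hlk hkh hh le_rfl

theorem pv_bs_absent (s : List Int) (query : Int) (hq : query ∉ s) (low high : Int)
    (h0 : 0 ≤ low) (hh : high < (s.length : Int)) :
    pv_bs s query low high = -1 :=
  pv_bs_go_absent _ s query hq low high h0 hh le_rfl


-- ===== VERDICT (by name: the statement is the Claim_ definition above) =====
theorem locate_card_binary_spec : Claim_equal_locate_card_binary := by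
  intro cards query _
  unfold Spec_locate_card_binary locate_card_binary locate_card_binary_alt
  have hperm := PySem.List.sorted_perm cards (fun x => x) true
  have hp : (PySem.List.sorted cards (fun x => x) true).Pairwise (fun a b => b ≤ a) :=
    PySem.List.sorted_pairwise_rev cards (fun x => x)
  by_cases hq : query ∈ cards
  · rw [if_pos hq]
    have hqs : query ∈ PySem.List.sorted cards (fun x => x) true := hperm.mem_iff.mpr hq
    have hcnt : (PySem.List.sorted cards (fun x => x) true).countP (fun x => decide (query < x))
        = cards.countP (fun x => decide (query < x)) := hperm.countP_eq _
    have hklen := pv_present_k_lt query _ hp hqs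
    rw [pv_bs_present _ query hp hqs 0 _ le_rfl (by omega) (by omega) (by omega)]
    rw [hcnt, List.countP_eq_length_filter]
  · rw [if_neg hq]
    exact pv_bs_absent _ query (fun h => hq (hperm.mem_iff.mp h)) 0 _ (le_rfl) (by omega)
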